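-- pv_equiv track=rewrite | github.com/shnhs/CoTe | 솔트룩스 코테/4.py | solution
-- ===== SOURCE A (Python) =====
-- from collections import deque
--
-- def solution(s):
--     answer = 0
--
--     # 텍스트를 탐색할 큐 생성
--     text_que = deque()
--     flag = None # 첫 시도에서 Flag는 None
--
--     # 주어진 텍스트를 하나씩 순회
--     for i in s:
--
--         if i == 'z': # z가 들어왔을 때
--             text_que.appendleft(i) # 큐에 넣기
--             if flag == None:
--                 flag = 'z' # 처음 큐에 들어왔다면 flag를 z로 변경
--                 continue
--             elif flag == 'a': # 이전에 flag가 a라면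
--                 text_que.pop() # 큐의 끝 값(a)를 팝하고
--                 answer += 1 # 정답 +1
--                 flag = 'z' # flag는 a로 변경
--             elif flag == 'z': # 이전의 flag가 z라면
--                 text_que.pop() # 이전의 z는 팝한다.
--
--         elif i =='a': # a가 들어올경우엔 z와 반대로 동작
--             text_que.appendleft(i)
--             if flag == None:
--                 flag = 'a'
--                 continue
--             elif flag == 'z':
--                 text_que.pop()
--                 answer += 1
--                 flag = 'a'
--             elif flag == 'a':
--                 text_que.pop()
--
--         else: # a나 z가 아닌경우 무시해도 됨
--             pass
--
--     return answer
-- ===== SOURCE B (Python) =====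
-- def solution(s):
--     t = [c for c in s if c == 'a' or c == 'z']
--
--     # divide and conquer: transitions in t[lo:hi] =
--     # transitions(left half) + transitions(right half) + boundary comparison
--     def count(lo, hi):
--         if hi - lo < 2:
--             return 0
--         mid = (lo + hi) // 2
--         return count(lo, mid) + count(mid, hi) + (1 if t[mid - 1] != t[mid] else 0)
--
--     return count(0, len(t))
-- ===== Notes on version B (the rewrite author's own statement) =====
-- stated objective: alternative
-- what changed: Replaces A's stateful flag/deque single pass with a filter pass followed by a divide-and-conquer recursion that splits the index range in halves and adds one boundary comparison per split.
import Mathlib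
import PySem

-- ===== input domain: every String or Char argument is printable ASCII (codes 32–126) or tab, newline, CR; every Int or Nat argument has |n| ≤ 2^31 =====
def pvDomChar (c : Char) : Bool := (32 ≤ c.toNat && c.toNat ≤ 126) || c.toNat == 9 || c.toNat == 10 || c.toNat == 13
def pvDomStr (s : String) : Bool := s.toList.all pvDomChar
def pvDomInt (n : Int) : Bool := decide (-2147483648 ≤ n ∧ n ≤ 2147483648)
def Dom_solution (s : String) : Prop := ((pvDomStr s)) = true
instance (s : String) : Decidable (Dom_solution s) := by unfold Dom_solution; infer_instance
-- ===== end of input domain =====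

-- B replaces A's stateful flag/deque single pass by a filter pass followed by a
-- divide-and-conquer recursion over index ranges (objective: alternative algorithm).

-- ===== PORT A =====
-- state: (answer, flag, text_que); appendleft = cons, pop (from the right) = dropLast
def solutionStep (st : Int × Option Char × List Char) (i : Char) : Int × Option Char × List Char :=
  let (ans, flag, que) := st
  if i = 'z' then
    let que' := i :: que
    match flag with
    | none     => (ans, some 'z', que')
    | some 'a' => (ans + 1, some 'z', que'.dropLast)
    | some 'z' => (ans, some 'z', que'.dropLast)
    | some _   => (ans, flag, que')   -- unreachable elif fall-through
  else if i = 'a' then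
    let que' := i :: que
    match flag with
    | none     => (ans, some 'a', que')
    | some 'z' => (ans + 1, some 'a', que'.dropLast)
    | some 'a' => (ans, some 'a', que'.dropLast)
    | some _   => (ans, flag, que')
  else (ans, flag, que)

def solution (s : String) : Int :=
  (s.toList.foldl solutionStep (0, none, [])).1

-- ===== PORT B =====
-- the nested `count(lo, hi)` of Source B; the list t is a closure parameter.
-- t[mid-1] / t[mid]: every call from solution_alt has 0 ≤ lo < mid < hi ≤ len t,
-- so both indices are in range; ported with getD (exact there).
def solutionCount (t : List Char) (lo hi : Nat) : Int :=
  if hi - lo < 2 then 0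
  else
    let mid := (lo + hi) / 2
    solutionCount t lo mid + solutionCount t mid hi
      + (if t.getD (mid - 1) ' ' ≠ t.getD mid ' ' then 1 else 0)
termination_by hi - lo
decreasing_by all_goals omega

def solution_alt (s : String) : Int :=
  let t := s.toList.filter (fun c => c == 'a' || c == 'z')
  solutionCount t 0 t.length

-- ===== PRECONDITION & SPEC =====
def Spec_solution (s : String) (out : Int) : Prop := out = solution_alt s
instance (s : String) (out : Int) : Decidable (Spec_solution s out) := by unfold Spec_solution; infer_instance

-- ===== CLAIM (what is proved, stated in full; the proofs are below) =====
def Claim_equal_solution : Prop := ∀ (s : String), Dom_solution s → Spec_solution s (solution s)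

-- ===== LEMMAS AND PROOFS =====

-- transition count of a list, recursively (the common yardstick of the two ports)
def pvCT : List Char → Int
  | [] => 0
  | [_] => 0
  | x :: y :: r => (if x ≠ y then 1 else 0) + pvCT (y :: r)

-- ---- A's loop computes pvCT of the filtered list ----
theorem pvLoop (l : List Char) (ans : Int) (flag : Option Char) (que : List Char)
    (hf : flag = none ∨ flag = some 'a' ∨ flag = some 'z') :
    (l.foldl solutionStep (ans, flag, que)).1
      = ans + pvCT ((flag.toList) ++ l.filter (fun c => c == 'a' || c == 'z')) := by
  induction l generalizing ans flag que with
  | nil =>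
    rcases hf with h | h | h <;> subst h <;> simp [pvCT, Option.toList]
  | cons i l ih =>
    by_cases hz : i = 'z'
    · subst hz
      rcases hf with h | h | h <;> subst h <;>
        simp only [List.foldl_cons, solutionStep, List.filter_cons, Option.toList] <;>
        norm_num <;>
        rw [ih _ _ _ (Or.inr (Or.inr rfl))] <;>
        simp [pvCT] <;> ring
    · by_cases ha : i = 'a'
      · subst ha
        rcases hf with h | h | h <;> subst h <;>
          simp only [List.foldl_cons, solutionStep, List.filter_cons, Option.toList,
            reduceIte] <;>
          rw [if_neg hz] <;>
          norm_num <;>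
          rw [ih _ _ _ (Or.inr (Or.inl rfl))] <;>
          simp [pvCT] <;> ring
      · have hfilter : (i :: l).filter (fun c => c == 'a' || c == 'z')
            = l.filter (fun c => c == 'a' || c == 'z') := by
          simp [ha, hz]
        simp only [List.foldl_cons, solutionStep, if_neg hz, if_neg ha, hfilter]
        exact ih ans flag que hf

-- ---- B's divide-and-conquer counts the differing adjacent index pairs of [lo, hi) ----
theorem pvDC_eq_countP (t : List Char) (lo hi : Nat) :
    solutionCount t lo hi
      = ((List.range' (lo + 1) (hi - lo - 1)).countP
          (fun i => t.getD i ' ' ≠ t.getD (i - 1) ' ') : Int) := by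
  by_cases h : hi - lo < 2
  · rw [solutionCount]
    simp only [if_pos h]
    have : hi - lo - 1 = 0 := by omega
    simp [this]
  · rw [solutionCount]
    simp only [if_neg h]
    have hmid1 : lo < (lo + hi) / 2 := by omega
    have hmid2 : (lo + hi) / 2 < hi := by omega
    rw [pvDC_eq_countP t lo ((lo + hi) / 2), pvDC_eq_countP t ((lo + hi) / 2) hi]
    have hsplit : List.range' (lo + 1) (hi - lo - 1)
        = List.range' (lo + 1) ((lo + hi) / 2 - lo - 1)
          ++ List.range' ((lo + hi) / 2) (hi - (lo + hi) / 2) := by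
      rw [show hi - lo - 1 = ((lo + hi) / 2 - lo - 1) + (hi - (lo + hi) / 2) by omega,
          ← List.range'_append,
          show lo + 1 + 1 * ((lo + hi) / 2 - lo - 1) = (lo + hi) / 2 by omega]
    have hcons : List.range' ((lo + hi) / 2) (hi - (lo + hi) / 2)
        = (lo + hi) / 2 :: List.range' ((lo + hi) / 2 + 1) (hi - (lo + hi) / 2 - 1) := by
      rw [show hi - (lo + hi) / 2 = (hi - (lo + hi) / 2 - 1) + 1 by omega]
      rw [List.range'_succ]
      rfl
    rw [hsplit, hcons, List.countP_append, List.countP_cons]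
    have h1 : hi - (lo + hi) / 2 - 1 = hi - ((lo + hi) / 2) - 1 := rfl
    push_cast
    split_ifs with hb <;> simp_all <;> ring
termination_by hi - lo
decreasing_by all_goals omega

-- ---- pvCT is the same adjacent-pair count ----
theorem pvCT_eq_countP (t : List Char) :
    pvCT t = ((List.range' 1 (t.length - 1)).countP
          (fun i => t.getD i ' ' ≠ t.getD (i - 1) ' ') : Int) := by
  induction t with
  | nil => simp [pvCT]
  | cons x t ih =>
    cases t with
    | nil => simp [pvCT]
    | cons y r =>
      have hlen : (x :: y :: r).length - 1 = (r.length + 1) := by simp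
      rw [hlen, show r.length + 1 = 1 + r.length by omega]
      have : List.range' 1 (1 + r.length) = 1 :: List.range' 2 r.length := by
        rw [Nat.add_comm, List.range'_succ]
      rw [this, List.countP_cons]
      have hshift : (List.range' 2 r.length).countP
            (fun i => decide (List.getD (x :: y :: r) i ' ' ≠ List.getD (x :: y :: r) (i - 1) ' '))
          = (List.range' 1 r.length).countP
            (fun i => decide (List.getD (y :: r) i ' ' ≠ List.getD (y :: r) (i - 1) ' ')) := by
        rw [show (2 : ℕ) = 1 + 1 by rfl, List.range'_eq_map_range,
            List.range'_eq_map_range]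
        rw [List.countP_map, List.countP_map]
        apply List.countP_congr
        intro i _
        simp only [Function.comp, List.getD_eq_getElem?_getD]
        rw [show 1 + 1 + i = (1 + i) + 1 from by omega,
            show 1 + i + 1 - 1 = (1 + i - 1) + 1 from by omega,
            List.getElem?_cons_succ, List.getElem?_cons_succ]
      rw [hshift]
      show pvCT (x :: y :: r) = _
      rw [pvCT, ih]
      have hlen2 : (y :: r).length - 1 = r.length := by simp
      rw [hlen2]
      simp only [List.getD_cons_succ, List.getD_cons_zero, Nat.sub_self]
      push_cast
      split_ifs with hb hb' <;> simp_all <;> ring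

-- ===== VERDICT (by name: the statement is the Claim_ definition above) =====
theorem solution_spec : Claim_equal_solution := by
  intro s _
  unfold Spec_solution solution solution_alt
  rw [pvLoop _ 0 none [] (Or.inl rfl)]
  simp only [Option.toList, List.nil_append, zero_add]
  rw [pvCT_eq_countP, pvDC_eq_countP]
  norm_num
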